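-- pv_equiv track=rewrite | github.com/ZulfaNurhuda/ComputationalThinking | Modules/Practice/p3-problem3.py | generatePattern
-- ===== SOURCE A (Python) =====
-- def generatePattern(c1: str, c2: str, n: int) -> str:
--     """ Description: `[FUNCTION] generatePattern` """
--     # +----------------------------------------------------+
--     # | FUNCTION <Generate Pattern>                        |
--     # +----------------------------------------------------+
--     # | RECURSIVELY GENERATES THE PATTERN.                 |
--     # +----------------------------------------------------+
--
--     # +------------------------+-----------+
--     # | LOCAL DICTIONARY       | DATA TYPE |
--     # +------------------------+-----------+
--     # | c1                     | STRING    |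
--     # | c2                     | STRING    |
--     # | n                      | INTEGER   |
--     # | previous_pattern       | STRING    |
--     # | complement_of_previous | STRING    |
--     # | char                   | STRING    |
--     # +------------------------+-----------+
--
--     """ FUNCTION ALGORITHM """
--     # BASE CASE: IF N IS 0, RETURN FIRST CHARACTER
--     if n == 0: return c1
--
--     # RECURSIVELY CALL TO GET THE PREVIOUS PATTERN
--     # GET PATTERN FOR LEVEL (n-1) TO BUILD CURRENT LEVEL
--     previous_pattern: str = generatePattern(c1, c2, n - 1)
--
--     # CREATE THE COMPLEMENT OF THE PREVIOUS PATTERN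
--     # INITIALIZE EMPTY STRING FOR COMPLEMENT PATTERN
--     complement_of_previous: str = ""
--     # ITERATE THROUGH EACH CHARACTER IN PREVIOUS PATTERN
--     for char in previous_pattern:
--         # IF CHARACTER IS c1, REPLACE WITH c2 IN COMPLEMENT
--         if char == c1:
--             complement_of_previous += c2
--         else:
--             # IF CHARACTER IS c2, REPLACE WITH c1 IN COMPLEMENT
--             complement_of_previous += c1
--
--     # RETURN CONCATENATION OF PREVIOUS PATTERN AND ITS COMPLEMENT
--     # CURRENT PATTERN = PREVIOUS + COMPLEMENT_OF_PREVIOUS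
--     return previous_pattern + complement_of_previous
-- ===== SOURCE B (Python) =====
-- def generatePattern(c1: str, c2: str, n: int) -> str:
--     result = c1
--     for _ in range(n):
--         result += "".join(c2 if ch == c1 else c1 for ch in result)
--     return result
-- ===== Notes on version B (the rewrite author's own statement) =====
-- stated objective: simpler
-- what changed: Replaces the recursive descent with per-character += accumulation by an iterative doubling loop that n times appends the join-built per-character complement of the current string.
-- crash fix: For n < 0 A recurses without a base case and raises RecursionError, while B's range(n) loop is empty and returns c1. — e.g. on generatePattern("a", "b", -1): A raises RecursionError, B returns "a"
import Mathlib
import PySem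

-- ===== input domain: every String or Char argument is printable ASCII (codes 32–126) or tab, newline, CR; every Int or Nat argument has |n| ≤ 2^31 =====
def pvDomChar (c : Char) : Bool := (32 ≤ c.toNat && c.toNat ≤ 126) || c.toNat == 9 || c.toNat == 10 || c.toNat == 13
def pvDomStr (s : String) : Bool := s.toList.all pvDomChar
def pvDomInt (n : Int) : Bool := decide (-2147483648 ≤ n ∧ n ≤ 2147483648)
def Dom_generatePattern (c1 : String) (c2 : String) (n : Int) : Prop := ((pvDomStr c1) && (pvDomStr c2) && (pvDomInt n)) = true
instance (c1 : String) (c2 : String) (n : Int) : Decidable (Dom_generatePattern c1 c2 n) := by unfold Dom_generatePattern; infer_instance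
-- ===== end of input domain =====

-- B replaces A's recursive descent with an iterative doubling loop (same char-by-char complement rule);
-- equivalence is claimed for n ≥ 0 (for n < 0 A recurses forever / RecursionError, B returns c1).

-- ===== PORT A =====
-- A recurses on n with base case n == 0; Pre_ restricts to n ≥ 0, so the
-- recursion depth is exactly n.toNat and we transcribe it as structural
-- recursion on that Nat.  The inner loop builds the complement by repeated
-- append with the same 'char == c1' branch order as the Python.
def pvGenA (c1 c2 : List Char) : Nat → List Char
  | 0 => c1
  | k + 1 =>
      let previous_pattern := pvGenA c1 c2 k
      let complement_of_previous :=
        previous_pattern.foldl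
          (fun acc ch => if [ch] = c1 then acc ++ c2 else acc ++ c1) []
      previous_pattern ++ complement_of_previous

def generatePattern (c1 : String) (c2 : String) (n : Int) : String :=
  String.mk (pvGenA c1.toList c2.toList n.toNat)

-- ===== PORT B =====
-- one doubling step of B's loop body: result += "".join(c2 if ch == c1 else c1 for ch in result)
def pvStepB (c1 c2 : List Char) (res : List Char) : List Char :=
  res ++ res.flatMap (fun ch => if [ch] = c1 then c2 else c1)

def generatePattern_alt (c1 : String) (c2 : String) (n : Int) : String :=
  String.mk
    ((PySem.List.pyRange 0 n 1).foldl
      (fun res _ => pvStepB c1.toList c2.toList res) c1.toList)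

-- ===== PRECONDITION & SPEC =====
-- Pre_ excludes n < 0, on which A's recursion never reaches the base case (RecursionError).
def Pre_generatePattern (c1 : String) (c2 : String) (n : Int) : Prop := 0 ≤ n
instance (c1 : String) (c2 : String) (n : Int) : Decidable (Pre_generatePattern c1 c2 n) := by
  unfold Pre_generatePattern; infer_instance

def pvWitness_generatePattern : String × String × Int := ("a", "b", 3)

-- For n < 0 A raises RecursionError, while B's range(n) loop is empty and B returns c1.
def Raises_generatePattern (c1 : String) (c2 : String) (n : Int) : Prop := n < 0
instance (c1 : String) (c2 : String) (n : Int) : Decidable (Raises_generatePattern c1 c2 n) := by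
  unfold Raises_generatePattern; infer_instance

def pvRaiseWitness_generatePattern : String × String × Int := ("a", "b", -1)
def pvRaiseWitnessOut_generatePattern : String := "a"

def Spec_generatePattern (c1 : String) (c2 : String) (n : Int) (out : String) : Prop :=
  out = generatePattern_alt c1 c2 n
instance (c1 : String) (c2 : String) (n : Int) (out : String) : Decidable (Spec_generatePattern c1 c2 n out) := by
  unfold Spec_generatePattern; infer_instance

-- ===== CLAIM (what is proved, stated in full; the proofs are below) =====
def Claim_equal_generatePattern : Prop := ∀ (c1 : String) (c2 : String) (n : Int), Dom_generatePattern c1 c2 n → Pre_generatePattern c1 c2 n → Spec_generatePattern c1 c2 n (generatePattern c1 c2 n)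

def Claim_raises_generatePattern : Prop := (∀ (c1 : String) (c2 : String) (n : Int), Dom_generatePattern c1 c2 n → Raises_generatePattern c1 c2 n → ¬ Pre_generatePattern c1 c2 n) ∧ (Dom_generatePattern (pvRaiseWitness_generatePattern.1) (pvRaiseWitness_generatePattern.2.1) (pvRaiseWitness_generatePattern.2.2) ∧ Raises_generatePattern (pvRaiseWitness_generatePattern.1) (pvRaiseWitness_generatePattern.2.1) (pvRaiseWitness_generatePattern.2.2) ∧ generatePattern_alt (pvRaiseWitness_generatePattern.1) (pvRaiseWitness_generatePattern.2.1) (pvRaiseWitness_generatePattern.2.2) = pvRaiseWitnessOut_generatePattern)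

-- ===== LEMMAS AND PROOFS =====

-- A's complement foldl builds the same list as B's flatMap.
theorem pvCompl_eq (c1 c2 prev : List Char) :
    prev.foldl (fun acc ch => if [ch] = c1 then acc ++ c2 else acc ++ c1) []
      = prev.flatMap (fun ch => if [ch] = c1 then c2 else c1) := by
  have h : (fun (acc : List Char) ch => if [ch] = c1 then acc ++ c2 else acc ++ c1)
      = fun acc ch => acc ++ (if [ch] = c1 then c2 else c1) := by
    funext acc ch; split <;> rfl
  rw [h, PySem.List.foldl_append_eq_flatMap]; simp

-- B's loop, run k times, computes pvGenA k.
theorem pvLoop_eq (c1 c2 : List Char) (k : Nat) :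
    (PySem.List.pyRange 0 (k : Int) 1).foldl (fun res _ => pvStepB c1 c2 res) c1
      = pvGenA c1 c2 k := by
  induction k with
  | zero => simp [PySem.List.pyRange_one_eq_nil, pvGenA]
  | succ k ih =>
      rw [show ((k + 1 : Nat) : Int) = (k : Int) + 1 by omega,
          PySem.List.pyRange_one_succ_right (by positivity)]
      simp only [List.foldl_append, List.foldl_cons, List.foldl_nil, ih]
      simp [pvGenA, pvStepB, pvCompl_eq]

-- ===== VERDICT (by name: the statement is the Claim_ definition above) =====
theorem generatePattern_spec : Claim_equal_generatePattern := by
  intro c1 c2 n _ hpre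
  unfold Spec_generatePattern generatePattern generatePattern_alt
  have hn : n = (n.toNat : Int) := (Int.toNat_of_nonneg hpre).symm
  rw [hn, pvLoop_eq, Int.toNat_natCast]

theorem generatePattern_raises : Claim_raises_generatePattern := by
  unfold Claim_raises_generatePattern
  exact ⟨fun c1 c2 n _ hr hp => absurd hp (by unfold Pre_generatePattern Raises_generatePattern at *; omega), by decide⟩

-- self-check: the concrete value the raises-claim asserts for B at the raise witness, extracted from the theorem above
theorem pvRaiseValue_ok : generatePattern_alt "a" "b" (-1) = "a" := generatePattern_raises.2.2.2
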